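-- pv_equiv track=rewrite | github.com/Fredrik-Jonssonn/KTH-projects2021 | frejon6-labb-3-master/hemligasprak.py | reverse_rovar
-- ===== SOURCE A (Python) =====
-- CONSONANTS = "bcdfghjklmnpqrstvwxzBCDFGHJKLMNPQRSTVWXZ"
--
-- def reverse_rovar(text):
--     output = ""
--     counter = 0
--     for char in text:
--         if counter > 0:
--             counter -= 1
--         elif char in CONSONANTS:
--             output += char
--             counter = 2
--         else:
--             output += char
--     return output
-- ===== SOURCE B (Python) =====
-- CONSONANTS = "bcdfghjklmnpqrstvwxzBCDFGHJKLMNPQRSTVWXZ"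
--
-- def reverse_rovar(text):
--     out = []
--     i = 0
--     n = len(text)
--     while i < n:
--         c = text[i]
--         out.append(c)
--         i += 3 if c in CONSONANTS else 1
--     return "".join(out)
-- ===== Notes on version B (the rewrite author's own statement) =====
-- stated objective: alternative
-- what changed: Replaces the per-character fold with a counter-decrement state by an index-skipping scan that emits each kept character and jumps 3 positions past a consonant (1 otherwise), collecting pieces in a list joined once.
import Mathlib
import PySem

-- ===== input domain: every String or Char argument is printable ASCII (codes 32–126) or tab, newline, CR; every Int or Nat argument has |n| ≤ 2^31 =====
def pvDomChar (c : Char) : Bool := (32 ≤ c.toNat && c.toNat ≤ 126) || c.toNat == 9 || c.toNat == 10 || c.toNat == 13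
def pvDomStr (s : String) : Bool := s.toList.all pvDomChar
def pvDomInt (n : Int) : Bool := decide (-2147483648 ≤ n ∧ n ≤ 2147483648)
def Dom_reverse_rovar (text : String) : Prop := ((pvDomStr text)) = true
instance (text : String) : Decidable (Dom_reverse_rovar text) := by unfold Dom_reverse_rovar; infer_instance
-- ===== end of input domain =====

-- B replaces A's counter-carrying per-character fold by an index-skipping scan (jump 3 past a consonant); alternative decomposition, same result.


-- ===== PORT A =====
def pvConsonants : List Char := "bcdfghjklmnpqrstvwxzBCDFGHJKLMNPQRSTVWXZ".toList

-- 'output += char' is accumulated as a List Char and rebuilt with String.ofList at the end (exact for Python str concatenation)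
def pvStepA (s : List Char × Int) (c : Char) : List Char × Int :=
  if s.2 > 0 then (s.1, s.2 - 1)
  else if c ∈ pvConsonants then (s.1 ++ [c], 2)
  else (s.1 ++ [c], 0)

def reverse_rovar (text : String) : String :=
  String.ofList (text.toList.foldl pvStepA ([], 0)).1

-- ===== PORT B =====
-- the while loop 'i += 3 if consonant else 1' is rendered as recursion on the suffix starting at i (drop 2 more after a consonant)
def pvGoB (l : List Char) (acc : List Char) : List Char :=
  match l with
  | [] => acc
  | c :: rest =>
    if c ∈ pvConsonants then pvGoB (rest.drop 2) (acc ++ [c])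
    else pvGoB rest (acc ++ [c])
termination_by l.length
decreasing_by all_goals (simp [List.length_drop]; try omega)

def reverse_rovar_alt (text : String) : String :=
  String.ofList (pvGoB text.toList [])

-- ===== PRECONDITION & SPEC =====
def Spec_reverse_rovar (text : String) (out : String) : Prop := out = reverse_rovar_alt text
instance (text : String) (out : String) : Decidable (Spec_reverse_rovar text out) := by unfold Spec_reverse_rovar; infer_instance

-- ===== CLAIM (what is proved, stated in full; the proofs are below) =====
def Claim_equal_reverse_rovar : Prop := ∀ (text : String), Dom_reverse_rovar text → Spec_reverse_rovar text (reverse_rovar text)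

-- ===== LEMMAS AND PROOFS =====

-- after a consonant A's counter is 2: the next two characters are swallowed, i.e. the fold continues on l.drop 2 with counter 0
theorem pv_skip2 (l : List Char) (o : List Char) :
    (l.foldl pvStepA (o, 2)).1 = ((l.drop 2).foldl pvStepA (o, 0)).1 := by
  match l with
  | [] => rfl
  | [x] => simp [List.foldl, pvStepA]
  | x :: y :: t => simp [List.foldl, pvStepA]

theorem pv_key (l : List Char) (acc : List Char) :
    (l.foldl pvStepA (acc, 0)).1 = pvGoB l acc := by
  match l with
  | [] => simp [pvGoB]
  | c :: rest =>
    by_cases h : c ∈ pvConsonants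
    · have h2 := pv_skip2 rest (acc ++ [c])
      have ih := pv_key (rest.drop 2) (acc ++ [c])
      simp [List.foldl, pvStepA, pvGoB, h, h2, ih]
    · have ih := pv_key rest (acc ++ [c])
      simp [List.foldl, pvStepA, pvGoB, h, ih]
termination_by l.length
decreasing_by all_goals (simp [List.length_drop]; try omega)

-- ===== VERDICT (by name: the statement is the Claim_ definition above) =====
theorem reverse_rovar_spec : Claim_equal_reverse_rovar := by
  intro text _
  unfold Spec_reverse_rovar reverse_rovar reverse_rovar_alt
  rw [pv_key]
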